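-- pv_equiv track=rewrite | github.com/yxl74/aagv3 | src/apk_analyzer/phase0/reflection_analyzer.py | _has_reflection_chain
-- ===== SOURCE A (Python) =====
-- from typing import Any, Dict, List, Optional, Tuple
--
-- def _has_reflection_chain(caller_hits: List[Dict[str, Any]]) -> bool:
--     sigs = [hit.get("signature", "") for hit in caller_hits]
--     has_forname = any("forName" in sig for sig in sigs)
--     has_getmethod = any(
--         "getMethod" in sig or "getDeclaredMethod" in sig for sig in sigs
--     )
--     has_invoke = any("invoke" in sig for sig in sigs)
--     return has_forname and has_getmethod and has_invoke
-- ===== SOURCE B (Python) =====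
-- from typing import Any, Dict, List
--
-- def _has_reflection_chain(caller_hits: List[Dict[str, Any]]) -> bool:
--     has_forname = has_getmethod = has_invoke = False
--     for hit in caller_hits:
--         sig = hit.get("signature", "")
--         has_forname = has_forname or "forName" in sig
--         has_getmethod = has_getmethod or "getMethod" in sig or "getDeclaredMethod" in sig
--         has_invoke = has_invoke or "invoke" in sig
--         if has_forname and has_getmethod and has_invoke:
--             return True
--     return has_forname and has_getmethod and has_invoke
-- ===== Notes on version B (the rewrite author's own statement) =====
-- stated objective: alternative
-- what changed: Replaced A's three independent any() scans over a pre-built signature list by a single fused pass over caller_hits maintaining three boolean flags with an early exit once all three substrings have been seen.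
import Mathlib
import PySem

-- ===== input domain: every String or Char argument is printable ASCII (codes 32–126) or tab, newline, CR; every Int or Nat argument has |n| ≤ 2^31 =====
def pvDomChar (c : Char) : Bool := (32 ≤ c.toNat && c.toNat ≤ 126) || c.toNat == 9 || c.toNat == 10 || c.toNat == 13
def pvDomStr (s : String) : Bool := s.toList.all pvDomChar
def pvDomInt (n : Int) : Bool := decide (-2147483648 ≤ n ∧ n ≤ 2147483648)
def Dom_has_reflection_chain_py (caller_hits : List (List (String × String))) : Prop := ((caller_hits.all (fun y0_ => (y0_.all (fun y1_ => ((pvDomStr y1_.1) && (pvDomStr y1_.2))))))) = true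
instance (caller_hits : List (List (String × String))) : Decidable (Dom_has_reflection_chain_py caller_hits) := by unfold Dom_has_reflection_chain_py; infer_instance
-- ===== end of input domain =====

-- B fuses A's three independent any() scans into one pass with three flags and an early exit (objective: alternative decomposition).

-- ===== PORT A =====
def has_reflection_chain_py (caller_hits : List (List (String × String))) : Bool :=
  let sigs := caller_hits.map (fun hit => (PySem.Dict.mk hit).getD "signature" "")
  let has_forname := sigs.any (fun sig => PySem.Str.isIn "forName" sig)
  let has_getmethod := sigs.any (fun sig =>
    PySem.Str.isIn "getMethod" sig || PySem.Str.isIn "getDeclaredMethod" sig)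
  let has_invoke := sigs.any (fun sig => PySem.Str.isIn "invoke" sig)
  has_forname && has_getmethod && has_invoke

-- ===== PORT B =====
def hrcAltLoop : List (List (String × String)) → Bool → Bool → Bool → Bool
  | [], f, g, i => f && g && i
  | hit :: rest, f, g, i =>
    let sig := (PySem.Dict.mk hit).getD "signature" ""
    let f := f || PySem.Str.isIn "forName" sig
    let g := g || PySem.Str.isIn "getMethod" sig || PySem.Str.isIn "getDeclaredMethod" sig
    let i := i || PySem.Str.isIn "invoke" sig
    if f && g && i then true else hrcAltLoop rest f g i

def has_reflection_chain_py_alt (caller_hits : List (List (String × String))) : Bool :=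
  hrcAltLoop caller_hits false false false

-- ===== PRECONDITION & SPEC =====
def Spec_has_reflection_chain_py (caller_hits : List (List (String × String))) (out : Bool) : Prop := out = has_reflection_chain_py_alt caller_hits
instance (caller_hits : List (List (String × String))) (out : Bool) : Decidable (Spec_has_reflection_chain_py caller_hits out) := by unfold Spec_has_reflection_chain_py; infer_instance

-- ===== CLAIM (what is proved, stated in full; the proofs are below) =====
def Claim_equal_has_reflection_chain_py : Prop := ∀ (caller_hits : List (List (String × String))), Dom_has_reflection_chain_py caller_hits → Spec_has_reflection_chain_py caller_hits (has_reflection_chain_py caller_hits)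

-- ===== LEMMAS AND PROOFS =====

theorem hrcAltLoop_eq (xs : List (List (String × String))) : ∀ (f g i : Bool),
    hrcAltLoop xs f g i =
      ((f || xs.any (fun hit => PySem.Str.isIn "forName" ((PySem.Dict.mk hit).getD "signature" ""))) &&
       (g || xs.any (fun hit =>
          PySem.Str.isIn "getMethod" ((PySem.Dict.mk hit).getD "signature" "") ||
          PySem.Str.isIn "getDeclaredMethod" ((PySem.Dict.mk hit).getD "signature" ""))) &&
       (i || xs.any (fun hit => PySem.Str.isIn "invoke" ((PySem.Dict.mk hit).getD "signature" "")))) := by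
  induction xs with
  | nil => intro f g i; simp [hrcAltLoop]
  | cons hit rest ih =>
    intro f g i
    simp only [hrcAltLoop, List.any_cons]
    split
    · rename_i h
      rw [eq_comm]
      simp only [Bool.and_eq_true, Bool.or_eq_true, List.any_eq_true] at h ⊢
      tauto
    · rw [ih]
      simp [Bool.or_assoc]

theorem has_reflection_chain_py_spec : Claim_equal_has_reflection_chain_py := by
  intro xs _
  unfold Spec_has_reflection_chain_py has_reflection_chain_py has_reflection_chain_py_alt
  rw [hrcAltLoop_eq]
  simp [List.any_map, Function.comp_def]
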